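-- pv_equiv track=rewrite | github.com/binbinsh/hugo-trainsh | cloudflare/worker.py | _extract_sitemap_locs
-- ===== SOURCE A (Python) =====
-- def _extract_sitemap_locs(xml: str) -> list[str]:
--     """
--     Extract <loc>...</loc> values from a sitemap XML string.
--     This is a lightweight parser by design (no external deps).
--     """
--     out: list[str] = []
--     xml = xml or ""
--     start = 0
--     while True:
--         i = xml.find("<loc>", start)
--         if i == -1:
--             break
--         j = xml.find("</loc>", i + 5)
--         if j == -1:
--             break
--         loc = xml[i + 5:j].strip()
--         if loc:
--             out.append(loc)
--         start = j + 6
--     return out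
-- ===== SOURCE B (Python) =====
-- def _extract_sitemap_locs(xml: str) -> list[str]:
--     """
--     Extract <loc>...</loc> values from a sitemap XML string.
--     Consumes the string suffix-by-suffix with str.partition instead of
--     index bookkeeping with find().
--     """
--     out: list[str] = []
--     rest = xml or ""
--     while "<loc>" in rest:
--         _, _, rest = rest.partition("<loc>")
--         body, sep, rest = rest.partition("</loc>")
--         if not sep:
--             break
--         loc = body.strip()
--         if loc:
--             out.append(loc)
--     return out
-- ===== Notes on version B (the rewrite author's own statement) =====
-- stated objective: alternative
-- what changed: Replaces A's index bookkeeping (find with a start index, then slicing xml[i+5:j]) by consuming the string suffix-by-suffix with str.partition, so no indices are tracked at all.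
import Mathlib
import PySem

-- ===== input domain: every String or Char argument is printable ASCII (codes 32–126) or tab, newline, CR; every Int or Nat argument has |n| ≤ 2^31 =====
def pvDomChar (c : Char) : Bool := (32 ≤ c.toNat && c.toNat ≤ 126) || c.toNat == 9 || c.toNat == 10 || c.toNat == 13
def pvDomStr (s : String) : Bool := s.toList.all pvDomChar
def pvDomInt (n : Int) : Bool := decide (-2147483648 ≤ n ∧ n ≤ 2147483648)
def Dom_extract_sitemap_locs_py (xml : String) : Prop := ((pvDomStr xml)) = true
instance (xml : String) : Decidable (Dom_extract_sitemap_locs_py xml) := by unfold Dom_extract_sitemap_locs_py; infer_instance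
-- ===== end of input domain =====

-- B replaces A's index bookkeeping (find with a start index, slicing) by consuming the string
-- suffix-by-suffix with str.partition; same return value, similar cost ('alternative').

-- ===== PORT A =====
-- A's while-loop; fuel only makes it total: each iteration moves 'start' past a
-- "<loc>…</loc>" pair (≥ 11 characters), so len+1 iterations are never exhausted.
-- 'xml = xml or ""' is the identity on every str (for "" the loop body finds nothing).
def aLoop (xml : String) : Nat → Int → List String → List String
  | 0, _, out => out
  | n+1, start, out =>
    let i := PySem.Str.findFrom xml "<loc>" start
    if i = -1 then out
    else
      let j := PySem.Str.findFrom xml "</loc>" (i + 5)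
      if j = -1 then out
      else
        let loc := PySem.Str.strip (PySem.Str.slice xml (some (i + 5)) (some j))
        aLoop xml n (j + 6) (if loc = "" then out else out ++ [loc])

def extract_sitemap_locs_py (xml : String) : List String :=
  aLoop xml (xml.toList.length + 1) 0 []

-- ===== PORT B =====
-- exact port of str.partition(sep) for nonempty sep: pt returns (part before the FIRST
-- occurrence of sep, part after it), or none when sep does not occur.
def ptB (sep : List Char) : List Char → Option (List Char × List Char)
  | [] => none
  | c :: cs =>
    if sep.isPrefixOf (c :: cs) then some ([], (c :: cs).drop sep.length)
    else
      match ptB sep cs with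
      | none => none
      | some (b, a) => some (c :: b, a)

def partitionB (s sep : List Char) : List Char × List Char × List Char :=
  match ptB sep s with
  | none => (s, [], [])
  | some (b, a) => (b, sep, a)

-- B's while-loop over the remaining suffix; fuel only makes it total (each iteration
-- drops at least 11 characters from 'rest').
def bLoop : Nat → List Char → List String → List String
  | 0, _, out => out
  | n+1, rest, out =>
    if PySem.Chars.isIn "<loc>".toList rest then
      match partitionB rest "<loc>".toList with
      | (_, _, r1) =>
        match partitionB r1 "</loc>".toList with
        | (body, sep, r2) =>
          if sep = [] then out
          else
            let loc := PySem.Chars.strip body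
            bLoop n r2 (if loc = [] then out else out ++ [String.ofList loc])
    else out

def extract_sitemap_locs_py_alt (xml : String) : List String :=
  bLoop (xml.toList.length + 1) xml.toList []

-- ===== PRECONDITION & SPEC =====
def Spec_extract_sitemap_locs_py (xml : String) (out : List String) : Prop := out = extract_sitemap_locs_py_alt xml
instance (xml : String) (out : List String) : Decidable (Spec_extract_sitemap_locs_py xml out) := by unfold Spec_extract_sitemap_locs_py; infer_instance

-- ===== CLAIM (what is proved, stated in full; the proofs are below) =====
def Claim_equal_extract_sitemap_locs_py : Prop := ∀ (xml : String), Dom_extract_sitemap_locs_py xml → Spec_extract_sitemap_locs_py xml (extract_sitemap_locs_py xml)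

-- ===== LEMMAS AND PROOFS =====

-- ptB finds nothing exactly when sep does not occur
theorem ptB_eq_none {sep cs : List Char} (h : ¬ sep <:+: cs) : ptB sep cs = none := by
  induction cs with
  | nil => rfl
  | cons c cs ih =>
    have hp : ¬ sep.isPrefixOf (c :: cs) := by
      intro hp
      exact h ((List.isPrefixOf_iff_prefix.mp hp).isInfix)
    have hi : ¬ sep <:+: cs := fun hi => h (hi.trans (List.suffix_cons c cs).isInfix)
    simp [ptB, hp, ih hi]

-- ptB at the first occurrence: if sep is a prefix of cs.drop m and of no earlier suffix,
-- ptB splits cs exactly there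
theorem ptB_first {sep cs : List Char} (hsep : sep ≠ []) :
    ∀ m : Nat, sep <+: cs.drop m → (∀ i : Nat, i < m → ¬ sep <+: cs.drop i) →
    ptB sep cs = some (cs.take m, cs.drop (m + sep.length)) := by
  induction cs with
  | nil =>
    intro m h1 _
    simp at h1
    exact absurd h1 hsep
  | cons c cs ih =>
    intro m h1 h2
    match m with
    | 0 =>
      have hp : sep.isPrefixOf (c :: cs) := List.isPrefixOf_iff_prefix.mpr (by simpa using h1)
      simp [ptB, hp]
    | m+1 =>
      have hp : ¬ sep.isPrefixOf (c :: cs) := by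
        intro hp
        exact h2 0 (Nat.succ_pos m) (by simpa using List.isPrefixOf_iff_prefix.mp hp)
      have h1' : sep <+: cs.drop m := by simpa using h1
      have h2' : ∀ i : Nat, i < m → ¬ sep <+: cs.drop i := by
        intro i hi hpre
        exact h2 (i+1) (by omega) (by simpa using hpre)
      have hms : m + 1 + sep.length = (m + sep.length) + 1 := by omega
      simp [ptB, hp, ih m h1' h2', hms, List.drop_succ_cons]

-- main invariant: A's loop from index 'start' equals B's loop on the suffix xml.drop start
theorem loop_eq (xml : String) :
    ∀ n start out, start ≤ xml.toList.length → xml.toList.length - start + 1 ≤ n →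
    aLoop xml n (start : Int) out = bLoop n (xml.toList.drop start) out := by
  intro n
  induction n with
  | zero => intro start out h1 h2; omega
  | succ n ih =>
    intro start out hst hn
    rw [aLoop, bLoop]
    simp only [PySem.Str.findFrom_eq,
      show ("<loc>" : String).toList = ['<','l','o','c','>'] from rfl,
      show ("</loc>" : String).toList = ['<','/','l','o','c','>'] from rfl]
    have hdd : ∀ m : Nat, (xml.toList.drop start).drop m = xml.toList.drop (start + m) := by
      intro m; rw [List.drop_drop]
    by_cases hi : PySem.Chars.findFrom xml.toList ['<','l','o','c','>'] (start : Int) = -1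
    · have hninf : ¬ ['<','l','o','c','>'] <:+: xml.toList.drop start :=
        (PySem.Chars.findFrom_natCast_eq_neg_one_iff _ _ start hst).mp hi
      have hIsIn : PySem.Chars.isIn ['<','l','o','c','>'] (xml.toList.drop start) = false := by
        rw [← Bool.not_eq_true, PySem.Chars.isIn_iff_infix]; exact hninf
      simp [hi, hIsIn]
    · obtain ⟨hle, hpref, hmin⟩ :=
        PySem.Chars.findFrom_natCast_spec xml.toList ['<','l','o','c','>'] start hst hi
      set iv := PySem.Chars.findFrom xml.toList ['<','l','o','c','>'] (start : Int) with hiv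
      set iN := iv.toNat with hiNdef
      have hivN : iv = (iN : Int) := by omega
      have hsle : start ≤ iN := by omega
      have hi5 : iN + 5 ≤ xml.toList.length := by
        have h5 := hpref.length_le
        simp only [List.length_drop, List.length_cons, List.length_nil] at h5
        omega
      have hIsIn : PySem.Chars.isIn ['<','l','o','c','>'] (xml.toList.drop start) = true := by
        rw [PySem.Chars.isIn_iff_infix]
        have h1 : (['<','l','o','c','>'] : List Char) <:+: xml.toList.drop iN := hpref.isInfix
        have h2 : xml.toList.drop iN <:+: xml.toList.drop start := by
          have : xml.toList.drop iN = (xml.toList.drop start).drop (iN - start) := by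
            rw [hdd]; congr 1; omega
          rw [this]; exact (List.drop_suffix _ _).isInfix
        exact h1.trans h2
      -- B's first partition, at "<loc>"
      have hpt1 : ptB ['<','l','o','c','>'] (xml.toList.drop start) =
          some ((xml.toList.drop start).take (iN - start), xml.toList.drop (iN + 5)) := by
        have h1 : (['<','l','o','c','>'] : List Char) <+: (xml.toList.drop start).drop (iN - start) := by
          rw [hdd]
          have : start + (iN - start) = iN := by omega
          rw [this]; exact hpref
        have h2 : ∀ i : Nat, i < iN - start → ¬ (['<','l','o','c','>'] : List Char) <+: (xml.toList.drop start).drop i := by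
          intro i hilt
          rw [hdd]
          exact hmin (start + i) (by omega) (by omega)
        rw [ptB_first (by decide) (iN - start) h1 h2, hdd]
        have : start + (iN - start + (['<','l','o','c','>'] : List Char).length) = iN + 5 := by
          simp; omega
        rw [this]
      rw [if_neg hi, if_pos hIsIn]
      simp only [partitionB, hpt1]
      -- the inner find for "</loc>" starts at iN + 5
      have hargs : iv + 5 = ((iN + 5 : Nat) : Int) := by omega
      rw [hargs]
      by_cases hj : PySem.Chars.findFrom xml.toList ['<','/','l','o','c','>'] ((iN + 5 : Nat) : Int) = -1
      · have hninf : ¬ ['<','/','l','o','c','>'] <:+: xml.toList.drop (iN + 5) :=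
          (PySem.Chars.findFrom_natCast_eq_neg_one_iff _ _ (iN + 5) hi5).mp hj
        simp only [ptB_eq_none hninf]
        rw [if_pos hj]; simp
      · obtain ⟨hjle, hjpref, hjmin⟩ :=
          PySem.Chars.findFrom_natCast_spec xml.toList ['<','/','l','o','c','>'] (iN + 5) hi5 hj
        set jv := PySem.Chars.findFrom xml.toList ['<','/','l','o','c','>'] ((iN + 5 : Nat) : Int) with hjv
        set jN := jv.toNat with hjNdef
        have hjvN : jv = (jN : Int) := by omega
        have hjle' : iN + 5 ≤ jN := by omega
        have hj6 : jN + 6 ≤ xml.toList.length := by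
          have h6 := hjpref.length_le
          simp only [List.length_drop, List.length_cons, List.length_nil] at h6
          omega
        have hdd5 : ∀ m : Nat, (xml.toList.drop (iN + 5)).drop m = xml.toList.drop (iN + 5 + m) := by
          intro m; rw [List.drop_drop]
        -- B's second partition, at "</loc>"
        have hpt2 : ptB ['<','/','l','o','c','>'] (xml.toList.drop (iN + 5)) =
            some ((xml.toList.drop (iN + 5)).take (jN - (iN + 5)), xml.toList.drop (jN + 6)) := by
          have h1 : (['<','/','l','o','c','>'] : List Char) <+: (xml.toList.drop (iN + 5)).drop (jN - (iN + 5)) := by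
            rw [hdd5]
            have : iN + 5 + (jN - (iN + 5)) = jN := by omega
            rw [this]; exact hjpref
          have h2 : ∀ i : Nat, i < jN - (iN + 5) → ¬ (['<','/','l','o','c','>'] : List Char) <+: (xml.toList.drop (iN + 5)).drop i := by
            intro i hilt
            rw [hdd5]
            exact hjmin (iN + 5 + i) (by omega) (by omega)
          rw [ptB_first (by decide) (jN - (iN + 5)) h1 h2, hdd5]
          have : iN + 5 + (jN - (iN + 5) + (['<','/','l','o','c','>'] : List Char).length) = jN + 6 := by
            simp; omega
          rw [this]
        rw [hpt2]
        rw [if_neg hj, if_neg (by decide : ¬ (['<','/','l','o','c','>'] : List Char) = [])]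
        -- A's extracted value equals B's stripped body
        have hloc : (PySem.Str.strip (PySem.Str.slice xml (some ((iN + 5 : Nat) : Int)) (some jv))).toList =
            PySem.Chars.strip ((xml.toList.drop (iN + 5)).take (jN - (iN + 5))) := by
          rw [PySem.Str.toList_strip, PySem.Str.toList_slice]
          congr 1
          show PySem.List.slice xml.toList (some ((iN + 5 : Nat) : Int)) (some jv) = _
          rw [hjvN, PySem.List.slice_toNat _ (by omega) (by omega)]
          have hc1 : ((jN : Int)).toNat = jN := by omega
          have hc2 : (((iN + 5 : Nat) : Int)).toNat = iN + 5 := by omega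
          rw [hc1, hc2]
        have hempty : (PySem.Str.strip (PySem.Str.slice xml (some ((iN + 5 : Nat) : Int)) (some jv)) = "")
            ↔ PySem.Chars.strip ((xml.toList.drop (iN + 5)).take (jN - (iN + 5))) = [] := by
          rw [← hloc, ← String.toList_inj]
          rfl
        have hval : PySem.Str.strip (PySem.Str.slice xml (some ((iN + 5 : Nat) : Int)) (some jv)) =
            String.ofList (PySem.Chars.strip ((xml.toList.drop (iN + 5)).take (jN - (iN + 5)))) := by
          rw [← hloc, String.ofList_toList]
        -- recurse
        have hrec : jv + 6 = ((jN + 6 : Nat) : Int) := by omega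
        rw [hrec, ih (jN + 6) _ hj6 (by omega)]
        by_cases hz : PySem.Chars.strip ((xml.toList.drop (iN + 5)).take (jN - (iN + 5))) = []
        · rw [if_pos (hempty.mpr hz), if_pos hz]
        · rw [if_neg (fun h => hz (hempty.mp h)), if_neg hz, hval]

theorem extract_sitemap_locs_py_spec : Claim_equal_extract_sitemap_locs_py := by
  intro xml _
  unfold Spec_extract_sitemap_locs_py extract_sitemap_locs_py extract_sitemap_locs_py_alt
  simpa using loop_eq xml (xml.toList.length + 1) 0 [] (Nat.zero_le _) (by omega)
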